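-- pv_equiv track=rewrite | github.com/olkku45/fortune-python | main.py | split_file_into_chunks
-- ===== SOURCE A (Python) =====
-- def split_file_into_chunks(file):
--     quotes = [""]
--
--     for line in file:
--         if line != "%":
--             if quotes[-1]:
--                 quotes[-1] += " "
--             quotes[-1] += line
--
--         else:
--             quotes.append("")
--
--     return quotes
-- ===== SOURCE B (Python) =====
-- def split_file_into_chunks(file):
--     # B: group lines by '%' first, then render each group (drop leading empty
--     # lines, join the rest with single spaces); same values as A.
--     groups = [[]]
--     for line in file:
--         if line == "%":
--             groups.append([])
--         else:
--             groups[-1].append(line)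
--     result = []
--     for g in groups:
--         rest = list(g)
--         while rest and rest[0] == "":
--             rest.pop(0)
--         result.append(" ".join(rest))
--     return result
-- ===== Notes on version B (the rewrite author's own statement) =====
-- stated objective: faster
-- what changed: A builds each chunk string incrementally while scanning (quadratic repeated string concatenation onto the last list element); B first partitions the lines into groups by '%' and then renders each group in a second pass by dropping its leading empty lines and joining the rest with a single ' '.join.
import Mathlib
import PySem

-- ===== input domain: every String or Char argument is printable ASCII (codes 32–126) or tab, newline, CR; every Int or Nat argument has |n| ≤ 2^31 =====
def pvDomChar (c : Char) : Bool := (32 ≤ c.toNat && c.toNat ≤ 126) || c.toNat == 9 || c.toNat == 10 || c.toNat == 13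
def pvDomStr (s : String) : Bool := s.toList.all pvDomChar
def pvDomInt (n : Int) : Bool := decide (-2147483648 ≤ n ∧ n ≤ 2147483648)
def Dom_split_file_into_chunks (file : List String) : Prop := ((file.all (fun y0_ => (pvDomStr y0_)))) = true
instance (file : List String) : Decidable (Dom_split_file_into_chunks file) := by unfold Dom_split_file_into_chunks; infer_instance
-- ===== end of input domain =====

-- B partitions the lines into '%'-delimited groups first and renders each group
-- (drop leading empty lines, join with spaces) in a second pass; same return
-- values as A's incremental string building (objective: alternative decomposition).


-- ===== PORT A =====
-- one loop step of A: mutate quotes[-1] or append a fresh ""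
def stepA (quotes : List String) (line : String) : List String :=
  if line ≠ "%" then
    let last := (quotes.getLast?).getD ""
    let last := if last ≠ "" then last ++ " " else last
    quotes.dropLast ++ [last ++ line]
  else
    quotes ++ [""]

def split_file_into_chunks (file : List String) : List String :=
  file.foldl stepA [""]

-- ===== PORT B =====
-- one loop step of B's first pass: start a new group on '%', else append to the last group
def stepB (groups : List (List String)) (line : String) : List (List String) :=
  if line == "%" then
    groups ++ [[]]
  else
    groups.dropLast ++ [((groups.getLast?).getD []) ++ [line]]

-- B's while loop: pop leading empty lines off a group
def dropLeadEmpty : List String → List String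
  | [] => []
  | x :: xs => if x == "" then dropLeadEmpty xs else x :: xs

def split_file_into_chunks_alt (file : List String) : List String :=
  (file.foldl stepB [[]]).map (fun g => PySem.Str.join " " (dropLeadEmpty g))

-- ===== PRECONDITION & SPEC =====
def Spec_split_file_into_chunks (file : List String) (out : List String) : Prop := out = split_file_into_chunks_alt file
instance (file : List String) (out : List String) : Decidable (Spec_split_file_into_chunks file out) := by unfold Spec_split_file_into_chunks; infer_instance

-- ===== CLAIM (what is proved, stated in full; the proofs are below) =====
def Claim_equal_split_file_into_chunks : Prop := ∀ (file : List String), Dom_split_file_into_chunks file → Spec_split_file_into_chunks file (split_file_into_chunks file)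

-- ===== LEMMAS AND PROOFS =====

-- how B renders one group (proof-side abbreviation)
def render (g : List String) : String := PySem.Str.join " " (dropLeadEmpty g)

theorem join_singleton' (a : String) : PySem.Str.join " " [a] = a := by
  simp [PySem.Str.join, PySem.Chars.join_singleton]

theorem join_cc (a b : String) (s : List String) :
    PySem.Str.join " " (a :: b :: s) = a ++ " " ++ PySem.Str.join " " (b :: s) := by
  simp only [PySem.Str.join, PySem.Chars.join_cons_cons, List.map_cons, String.ofList_append,
    String.ofList_toList]

theorem append_eq_empty (s t : String) (h : s ++ t = "") : s = "" ∧ t = "" := by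
  simpa using congrArg String.toList h

theorem dropLeadEmpty_snoc (g : List String) (x : String) :
    dropLeadEmpty (g ++ [x]) =
      if dropLeadEmpty g = [] then dropLeadEmpty [x] else dropLeadEmpty g ++ [x] := by
  induction g with
  | nil => simp [dropLeadEmpty]
  | cons a t ih =>
      by_cases ha : a = ""
      · simpa [dropLeadEmpty, ha] using ih
      · simp [dropLeadEmpty, ha]

theorem dropLeadEmpty_head_ne (g : List String) (a : String) (t : List String)
    (h : dropLeadEmpty g = a :: t) : a ≠ "" := by
  induction g with
  | nil => simp [dropLeadEmpty] at h
  | cons b s ih =>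
      by_cases hb : b = ""
      · exact ih (by simpa [dropLeadEmpty, hb] using h)
      · rw [dropLeadEmpty, if_neg (by simpa using hb)] at h
        injection h with h1 _
        exact h1 ▸ hb

theorem join_snoc (l : List String) (x : String) (h : l ≠ []) :
    PySem.Str.join " " (l ++ [x]) = PySem.Str.join " " l ++ " " ++ x := by
  induction l with
  | nil => exact absurd rfl h
  | cons a t ih =>
      cases t with
      | nil => rw [List.cons_append, List.nil_append, join_cc, join_singleton', join_singleton']
      | cons b s =>
          rw [List.cons_append, List.cons_append, join_cc, ← List.cons_append,
            ih (by simp), join_cc]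
          simp [String.append_assoc]

theorem join_cons_ne_empty (a : String) (t : List String) (h : a ≠ "") :
    PySem.Str.join " " (a :: t) ≠ "" := by
  cases t with
  | nil => simpa [join_singleton'] using h
  | cons b s =>
      rw [join_cc]
      intro hc
      have h1 := append_eq_empty _ _ hc
      have h2 := append_eq_empty _ _ h1.1
      exact h (h2.1)

theorem renderSnoc (g : List String) (x : String) :
    render (g ++ [x]) = (if render g ≠ "" then render g ++ " " else render g) ++ x := by
  unfold render
  rw [dropLeadEmpty_snoc]
  cases hd : dropLeadEmpty g with
  | nil =>
      by_cases hx : x = "" <;>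
        simp [dropLeadEmpty, hx, PySem.Str.join, PySem.Chars.join_nil]
  | cons a t =>
      have ha : a ≠ "" := dropLeadEmpty_head_ne g a t hd
      have hne := join_cons_ne_empty a t ha
      rw [if_neg (by simp), if_pos hne]
      exact join_snoc (a :: t) x (by simp)

theorem step_comm (gs : List (List String)) (h : gs ≠ []) (line : String) :
    stepA (gs.map render) line = (stepB gs line).map render := by
  by_cases hl : line = "%"
  · simp [stepA, stepB, hl, render, dropLeadEmpty, PySem.Str.join]
  · obtain ⟨g, hg⟩ := List.getLast?_isSome.mpr h |> Option.isSome_iff_exists.mp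
    simp [stepA, stepB, hl, List.map_dropLast, List.getLast?_map, hg, renderSnoc]

theorem stepB_ne_nil (gs : List (List String)) (line : String) : stepB gs line ≠ [] := by
  unfold stepB; split <;> simp

theorem foldl_comm (file : List String) (gs : List (List String)) (h : gs ≠ []) :
    file.foldl stepA (gs.map render) = (file.foldl stepB gs).map render := by
  induction file generalizing gs with
  | nil => rfl
  | cons line rest ih =>
      simp only [List.foldl_cons, step_comm gs h line]
      exact ih _ (stepB_ne_nil gs line)

-- ===== VERDICT (by name: the statement is the Claim_ definition above) =====
theorem split_file_into_chunks_spec : Claim_equal_split_file_into_chunks := by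
  intro file _
  unfold Spec_split_file_into_chunks split_file_into_chunks split_file_into_chunks_alt
  have : ([""] : List String) = ([[]] : List (List String)).map render := by
    simp [render, dropLeadEmpty, PySem.Str.join]
  rw [this, foldl_comm file [[]] (by simp)]
  rfl
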